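-- pv_equiv track=rewrite | github.com/Lyxal/51AC8 | src/skParse.py | get_chars_bounds
-- ===== SOURCE A (Python) =====
-- def get_chars_bounds(string, chars):
--     # Get bounds for group of chars
--     in_range = False
--     end_index = None
--
--     i = 0
--     while i < len(string):
--         char = string[i]
--         if char in chars:
--             in_range = True
--         else:
--             if in_range:
--                 end_index = i
--                 break
--         i += 1
--     else:
--         end_index = i
--
--     return end_index
-- ===== SOURCE B (Python) =====
-- def get_chars_bounds(string, chars):
--     # Reduce to pattern search: encode membership as a 0/1 mask string and find
--     # the first "10" (group char followed by non-group char); the boundary is one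
--     # past that occurrence, or len(string) if the pattern never occurs.
--     mask = ''.join('1' if c in chars else '0' for c in string)
--     i = mask.find('10')
--     return len(string) if i == -1 else i + 1
-- ===== Notes on version B (the rewrite author's own statement) =====
-- stated objective: alternative
-- what changed: Replaced A's flagged while-loop with while-else by a reduction to substring search: encode each character's membership in chars as a 0/1 mask string and locate the first occurrence of the pattern '10'; the boundary is one past it, len(string) if absent.
import Mathlib
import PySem

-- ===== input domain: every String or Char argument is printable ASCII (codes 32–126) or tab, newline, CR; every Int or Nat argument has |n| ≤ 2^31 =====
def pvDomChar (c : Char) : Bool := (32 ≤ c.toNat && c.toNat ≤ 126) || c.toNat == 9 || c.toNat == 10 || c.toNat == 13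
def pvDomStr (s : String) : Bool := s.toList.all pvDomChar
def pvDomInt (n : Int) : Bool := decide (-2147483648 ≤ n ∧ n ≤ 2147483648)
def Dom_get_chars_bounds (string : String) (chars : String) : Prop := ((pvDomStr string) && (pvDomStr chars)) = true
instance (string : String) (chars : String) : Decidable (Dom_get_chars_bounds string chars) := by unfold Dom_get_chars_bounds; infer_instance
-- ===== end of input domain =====

-- B replaces A's flagged while-loop (with while-else) by a reduction to pattern
-- search on a boolean membership mask; objective: alternative decomposition.

-- ===== PORT A =====
-- A's while-loop: index i, flag in_range; while-else sets end_index = len(string)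
-- when the loop runs off the end without break.
def gcbLoopA (cs : List Char) : List Char → Int → Bool → Int
  | [], i, _ => i
  | c :: rest, i, in_range =>
    if cs.contains c then gcbLoopA cs rest (i + 1) true
    else if in_range then i
    else gcbLoopA cs rest (i + 1) in_range

def get_chars_bounds (string : String) (chars : String) : Option Int :=
  some (gcbLoopA chars.toList string.toList 0 false)

-- ===== PORT B =====
-- Source B builds a 0/1 membership mask (here: List Bool) and searches it for the
-- pattern "10" (mask.find('10'), ported as the structural search gcbFind10);
-- boundary = hit + 1, or len(string) when the pattern is absent (find = -1).
def gcbFind10 : List Bool → Option Nat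
  | true :: false :: _ => some 0
  | _ :: rest => (gcbFind10 rest).map (· + 1)
  | [] => none

def get_chars_bounds_alt (string : String) (chars : String) : Option Int :=
  let mask := string.toList.map (fun c => chars.toList.contains c)
  match gcbFind10 mask with
  | none => some (string.toList.length : Int)
  | some i => some ((i + 1 : Nat) : Int)

-- ===== PRECONDITION & SPEC =====
def Spec_get_chars_bounds (string : String) (chars : String) (out : Option Int) : Prop := out = get_chars_bounds_alt string chars
instance (string : String) (chars : String) (out : Option Int) : Decidable (Spec_get_chars_bounds string chars out) := by unfold Spec_get_chars_bounds; infer_instance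

-- ===== CLAIM (what is proved, stated in full; the proofs are below) =====
def Claim_equal_get_chars_bounds : Prop := ∀ (string : String) (chars : String), Dom_get_chars_bounds string chars → Spec_get_chars_bounds string chars (get_chars_bounds string chars)

-- ===== LEMMAS AND PROOFS =====

lemma gcbLoopA_true (cs : List Char) : ∀ (s : List Char) (j : Int),
    gcbLoopA cs s j true =
      match gcbFind10 (true :: s.map (fun c => cs.contains c)) with
      | none => j + s.length
      | some i => j + i := by
  intro s
  induction s with
  | nil => intro j; simp [gcbLoopA, gcbFind10]
  | cons c rest ih =>
    intro j
    by_cases h : cs.contains c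
    · simp only [gcbLoopA, h, if_true, List.map_cons, ih]
      rw [show gcbFind10 (true :: true :: rest.map (fun c => cs.contains c)) =
            (gcbFind10 (true :: rest.map (fun c => cs.contains c))).map (· + 1) from rfl]
      cases hf : gcbFind10 (true :: rest.map (fun c => cs.contains c)) with
      | none => simp; ring
      | some k => simp; ring
    · simp only [gcbLoopA, h, Bool.false_eq_true, if_false, if_true, List.map_cons]
      rw [show gcbFind10 (true :: false :: rest.map (fun c => cs.contains c)) = some 0 from rfl]
      simp

lemma gcbLoopA_false (cs : List Char) : ∀ (s : List Char) (j : Int),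
    gcbLoopA cs s j false =
      match gcbFind10 (s.map (fun c => cs.contains c)) with
      | none => j + s.length
      | some i => j + i + 1 := by
  intro s
  induction s with
  | nil => intro j; simp [gcbLoopA, gcbFind10]
  | cons c rest ih =>
    intro j
    by_cases h : cs.contains c
    · simp only [gcbLoopA, h, if_true, List.map_cons]
      rw [gcbLoopA_true]
      rw [show gcbFind10 (true :: rest.map (fun c => cs.contains c)) =
            match rest.map (fun c => cs.contains c) with
            | false :: _ => some 0
            | l => (gcbFind10 l).map (· + 1) from ?_]
      · cases hr : rest.map (fun c => cs.contains c) with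
        | nil => simp [gcbFind10]; have := congrArg List.length hr; simp at this; simp [this]
        | cons b tl =>
          cases b with
          | false => simp
          | true =>
            cases hf : gcbFind10 (true :: tl) with
            | none =>
              simp only [hf, Option.map_none]
              have := congrArg List.length hr; simp at this
              simp [this]; ring
            | some k => simp [hf]; ring
      · cases hr : rest.map (fun c => cs.contains c) with
        | nil => rfl
        | cons b tl => cases b <;> rfl
    · simp only [gcbLoopA, h, Bool.false_eq_true, if_false, List.map_cons]
      rw [ih]
      rw [show gcbFind10 (false :: rest.map (fun c => cs.contains c)) =
            (gcbFind10 (rest.map (fun c => cs.contains c))).map (· + 1) from rfl]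
      cases hf : gcbFind10 (rest.map (fun c => cs.contains c)) with
      | none => simp; ring
      | some k => simp; ring

-- ===== VERDICT (by name: the statement is the Claim_ definition above) =====
theorem get_chars_bounds_spec : Claim_equal_get_chars_bounds := by
  intro string chars _
  unfold Spec_get_chars_bounds get_chars_bounds get_chars_bounds_alt
  rw [gcbLoopA_false]
  cases hf : gcbFind10 (string.toList.map (fun c => chars.toList.contains c)) with
  | none => dsimp only; rw [hf]; simp
  | some i => dsimp only; rw [hf]; simp
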